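-- pv_equiv track=rewrite | github.com/SansPapyrus683/usaco-solutions | src/section2/part3/prefix/this_science.py | get_valid
-- ===== SOURCE A (Python) =====
-- def get_valid(the_prefixes, huge_molecule):
--     possible = [False for _ in range(len(huge_molecule) + 1)]  # this[i] = whether prefix of len i can be made
--     possible[0] = True  # i mean we can always make a prefix of len 0
--
--     for up_to in range(len(huge_molecule) + 1):
--         for poss in the_prefixes:
--             if up_to - len(poss) < 0:
--                 continue
--             # if the previous one is possible, see if we can just tack poss onto the prev to get another prefix
--             if possible[up_to - len(poss)] and huge_molecule[up_to - len(poss): up_to] == poss: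
--                 possible[up_to] = True
--                 break
--     return possible
-- ===== SOURCE B (Python) =====
-- def _insert(t, word, i):
--     # t: first-child/next-sibling trie node (None or (char, is_end, child, sibling));
--     # insert the nonempty suffix word[i:] into the sibling chain t
--     c = word[i]
--     last = i + 1 == len(word)
--     if t is None:
--         child = None if last else _insert(None, word, i + 1)
--         return (c, last, child, None)
--     ch, e, sub, sib = t
--     if ch == c:
--         if last:
--             return (c, True, sub, sib)
--         return (c, e, _insert(sub, word, i + 1), sib)
--     return (ch, e, sub, _insert(sib, word, i))
--
--
-- def get_valid(the_prefixes, huge_molecule):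
--     root = None
--     for p in the_prefixes:
--         if p:
--             root = _insert(root, p, 0)
--     n = len(huge_molecule)
--     possible = [False] * (n + 1)
--     possible[0] = True
--     for i in range(n):
--         if possible[i]:
--             t = root
--             j = i
--             while t is not None and j < n:
--                 ch, e, sub, sib = t
--                 if huge_molecule[j] == ch:
--                     j += 1
--                     if e:
--                         possible[j] = True
--                     t = sub
--                 else:
--                     t = sib
--     return possible
-- ===== Notes on version B (the rewrite author's own statement) =====
-- stated objective: faster
-- what changed: Replaces A's per-position backward scan comparing every prefix by slice against a trie of the prefixes: from each already-reachable position B walks the trie forward along the molecule once, marking the end positions it passes, so shared prefixes are matched once instead of once per word.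
import Mathlib
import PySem

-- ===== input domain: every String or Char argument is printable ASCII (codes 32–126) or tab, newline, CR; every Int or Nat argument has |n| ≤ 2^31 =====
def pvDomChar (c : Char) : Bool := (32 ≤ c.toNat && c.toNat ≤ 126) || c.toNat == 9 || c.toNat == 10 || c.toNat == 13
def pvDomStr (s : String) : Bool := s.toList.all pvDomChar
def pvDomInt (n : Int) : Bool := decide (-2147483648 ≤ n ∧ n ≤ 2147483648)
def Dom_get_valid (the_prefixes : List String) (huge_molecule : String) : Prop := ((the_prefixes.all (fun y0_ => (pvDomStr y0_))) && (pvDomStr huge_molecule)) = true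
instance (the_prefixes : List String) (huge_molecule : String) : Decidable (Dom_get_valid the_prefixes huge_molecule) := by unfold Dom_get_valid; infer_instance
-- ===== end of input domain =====

-- B builds a trie of the prefixes and, from each already-reachable position, walks the trie
-- forward along the molecule marking the end positions it passes (objective: faster).

-- ===== PORT A =====
-- Literal port of A. possible[i] accesses are in range whenever the guard l ≤ up_to holds,
-- so List.getD is exact; the slice huge_molecule[up_to-l : up_to] has 0 ≤ up_to-l ≤ up_to ≤ n,
-- where Python's slice is exactly (drop (up_to-l)).take l.
def get_valid (the_prefixes : List String) (huge_molecule : String) : List Bool :=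
  let cs := huge_molecule.toList
  let n := cs.length
  let possible := (List.replicate (n + 1) false).set 0 true
  (List.range (n + 1)).foldl (fun poss up_to =>
    -- inner 'for … if …: set; break' = first prefix satisfying the condition, if any
    match the_prefixes.find? (fun p =>
      let l := p.toList.length
      decide (l ≤ up_to) && poss.getD (up_to - l) false
        && ((cs.drop (up_to - l)).take l == p.toList)) with
    | some _ => poss.set up_to true
    | none => poss) possible

-- ===== PORT B =====
-- First-child/next-sibling trie, exactly Source B's nested tuples (None = nil).
inductive PTrie : Type where
  | nil : PTrie
  | node : Char → Bool → PTrie → PTrie → PTrie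
deriving DecidableEq, Repr

-- Source B's _insert: insert the nonempty suffix c :: rest into sibling chain t.
def insertT : PTrie → Char → List Char → PTrie
  | PTrie.nil, c, [] => PTrie.node c true PTrie.nil PTrie.nil
  | PTrie.nil, c, r :: rs => PTrie.node c false (insertT PTrie.nil r rs) PTrie.nil
  | PTrie.node ch e sub sib, c, rest =>
    if ch = c then
      match rest with
      | [] => PTrie.node c true sub sib
      | r :: rs => PTrie.node c e (insertT sub r rs) sib
    else PTrie.node ch e sub (insertT sib c rest)
termination_by t _ rest => (sizeOf t, rest.length)

-- Source B's inner while loop: walk the trie along cs from position j, marking end positions.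
def walkMark (cs : List Char) : PTrie → Nat → List Bool → List Bool
  | PTrie.nil, _, poss => poss
  | PTrie.node ch e sub sib, j, poss =>
    if _h : j < cs.length then
      if cs.getD j default = ch then
        walkMark cs sub (j + 1) (if e then poss.set (j + 1) true else poss)
      else walkMark cs sib j poss
    else poss
termination_by t j _ => (cs.length - j, sizeOf t)

def get_valid_alt (the_prefixes : List String) (huge_molecule : String) : List Bool :=
  let root := the_prefixes.foldl (fun r p =>
    match p.toList with
    | [] => r
    | c :: rest => insertT r c rest) PTrie.nil
  let cs := huge_molecule.toList
  let n := cs.length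
  let possible := (List.replicate (n + 1) false).set 0 true
  (List.range n).foldl (fun poss i =>
    if poss.getD i false then walkMark cs root i poss else poss) possible

-- ===== PRECONDITION & SPEC =====
def Spec_get_valid (the_prefixes : List String) (huge_molecule : String) (out : List Bool) : Prop := out = get_valid_alt the_prefixes huge_molecule
instance (the_prefixes : List String) (huge_molecule : String) (out : List Bool) : Decidable (Spec_get_valid the_prefixes huge_molecule out) := by unfold Spec_get_valid; infer_instance

-- ===== CLAIM (what is proved, stated in full; the proofs are below) =====
def Claim_equal_get_valid : Prop := ∀ (the_prefixes : List String) (huge_molecule : String), Dom_get_valid the_prefixes huge_molecule → Spec_get_valid the_prefixes huge_molecule (get_valid the_prefixes huge_molecule)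

-- ===== LEMMAS AND PROOFS =====

-- Reference table: reachTable ps cs k = the list [reach 0, …, reach k] of the word-break DP.
def reachTable (ps : List String) (cs : List Char) : Nat → List Bool
  | 0 => [true]
  | k + 1 =>
    let t := reachTable ps cs k
    t ++ [ps.any (fun p =>
      let l := p.toList.length
      decide (1 ≤ l) && decide (l ≤ k + 1) && t.getD (k + 1 - l) false
        && ((cs.drop (k + 1 - l)).take l == p.toList))]

def reach (ps : List String) (cs : List Char) (k : Nat) : Bool :=
  (reachTable ps cs k).getD k false

theorem length_reachTable (ps : List String) (cs : List Char) (k : Nat) :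
    (reachTable ps cs k).length = k + 1 := by
  induction k with
  | zero => rfl
  | succ k ih => simp [reachTable, ih]

theorem getD_reachTable (ps : List String) (cs : List Char) {j k : Nat} (h : j ≤ k) :
    (reachTable ps cs k).getD j false = reach ps cs j := by
  induction k with
  | zero => interval_cases j; rfl
  | succ k ih =>
    obtain ⟨x, hx⟩ : ∃ x, reachTable ps cs (k + 1) = reachTable ps cs k ++ [x] := ⟨_, rfl⟩
    rcases Nat.lt_or_ge j (k + 1) with hj | hj
    · rw [← ih (Nat.lt_succ_iff.mp hj), hx,
        List.getD_append _ _ _ _ (by rw [length_reachTable]; omega)]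
    · have hj' : j = k + 1 := le_antisymm h hj
      subst hj'
      rfl

theorem reach_succ (ps : List String) (cs : List Char) (k : Nat) :
    reach ps cs (k + 1) = ps.any (fun p =>
      let l := p.toList.length
      decide (1 ≤ l) && decide (l ≤ k + 1) && reach ps cs (k + 1 - l)
        && ((cs.drop (k + 1 - l)).take l == p.toList)) := by
  have : reach ps cs (k + 1)
      = (reachTable ps cs k ++ [ps.any (fun p =>
          let l := p.toList.length
          decide (1 ≤ l) && decide (l ≤ k + 1) && (reachTable ps cs k).getD (k + 1 - l) false
            && ((cs.drop (k + 1 - l)).take l == p.toList))]).getD (k + 1) false := rfl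
  rw [this, List.getD_append_right _ _ _ _ (by rw [length_reachTable])]
  rw [length_reachTable, Nat.sub_self, List.getD_cons_zero]
  congr 1
  funext p
  simp only [String.length_toList]
  by_cases h1 : 1 ≤ p.length
  · by_cases h2 : p.length ≤ k + 1
    · rw [getD_reachTable ps cs (by omega)]
    · simp [h2]
  · simp [h1]

-- A's accumulator after processing up_to = 0, …, t.
theorem A_loop (ps : List String) (cs : List Char) (t : Nat) (ht : t ≤ cs.length) :
    (List.range (t + 1)).foldl (fun poss up_to =>
      match ps.find? (fun p =>
        let l := p.toList.length
        decide (l ≤ up_to) && poss.getD (up_to - l) false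
          && ((cs.drop (up_to - l)).take l == p.toList)) with
      | some _ => poss.set up_to true
      | none => poss) ((List.replicate (cs.length + 1) false).set 0 true)
    = reachTable ps cs t ++ List.replicate (cs.length - t) false := by
  induction t with
  | zero =>
    have hinit : (List.replicate (cs.length + 1) false).set 0 true
        = true :: List.replicate cs.length false := by
      rw [List.replicate_succ, List.set_cons_zero]
    simp only [Nat.zero_add, List.range_one, List.foldl_cons, List.foldl_nil, hinit]
    cases hf : ps.find? _ with
    | none => rfl
    | some p => rw [List.set_cons_zero]; rfl
  | succ t ih =>
    have ih' := ih (by omega)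
    rw [List.range_succ, List.foldl_append, List.foldl_cons, List.foldl_nil, ih']
    have hrep : List.replicate (cs.length - t) false
        = false :: List.replicate (cs.length - (t + 1)) false := by
      have : cs.length - t = (cs.length - (t + 1)) + 1 := by omega
      rw [this, List.replicate_succ]
    set P := reachTable ps cs t with hP
    have hPlen : P.length = t + 1 := length_reachTable ps cs t
    rw [hrep]
    set poss := P ++ false :: List.replicate (cs.length - (t + 1)) false with hposs
    have hplen : poss.length = cs.length + 1 := by
      simp [hposs, hPlen]; omega
    have hcond : ∀ p : String,
        (decide (p.toList.length ≤ t + 1) && poss.getD (t + 1 - p.toList.length) false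
          && ((cs.drop (t + 1 - p.toList.length)).take p.toList.length == p.toList))
        = (decide (1 ≤ p.toList.length) && decide (p.toList.length ≤ t + 1)
            && P.getD (t + 1 - p.toList.length) false
            && ((cs.drop (t + 1 - p.toList.length)).take p.toList.length == p.toList)) := by
      intro p
      by_cases h1 : 1 ≤ p.toList.length
      · by_cases h2 : p.toList.length ≤ t + 1
        · have : poss.getD (t + 1 - p.toList.length) false
              = P.getD (t + 1 - p.toList.length) false := by
            rw [hposs, List.getD_append _ _ _ _ (by omega)]
          rw [this]
          simp only [String.length_toList] at h1 h2
          simp [h1, h2]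
        · simp only [String.length_toList] at h2
          simp [h2]
      · have h0 : p.toList.length = 0 := by omega
        have : poss.getD (t + 1 - p.toList.length) false = false := by
          rw [h0, Nat.sub_zero, hposs,
            List.getD_append_right _ _ _ _ (by omega), hPlen, Nat.sub_self,
            List.getD_cons_zero]
        rw [this]
        simp only [String.length_toList] at h1
        simp [h1]
    have hT : reachTable ps cs (t + 1)
        = P ++ [ps.any (fun p =>
            let l := p.toList.length
            decide (1 ≤ l) && decide (l ≤ t + 1) && P.getD (t + 1 - l) false
              && ((cs.drop (t + 1 - l)).take l == p.toList))] := rfl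
    cases hf : ps.find? (fun p =>
        let l := p.toList.length
        decide (l ≤ t + 1) && poss.getD (t + 1 - l) false
          && ((cs.drop (t + 1 - l)).take l == p.toList)) with
    | none =>
      have hany : ps.any (fun p =>
          let l := p.toList.length
          decide (1 ≤ l) && decide (l ≤ t + 1) && P.getD (t + 1 - l) false
            && ((cs.drop (t + 1 - l)).take l == p.toList)) = false := by
        rw [List.any_eq_false]
        intro p hp
        rw [← hcond p]
        exact List.find?_eq_none.mp hf p hp
      rw [hT, hany, hposs, List.append_cons]
    | some p =>
      have hmem := List.mem_of_find?_eq_some hf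
      have hfp := List.find?_some hf
      have hany : ps.any (fun p =>
          let l := p.toList.length
          decide (1 ≤ l) && decide (l ≤ t + 1) && P.getD (t + 1 - l) false
            && ((cs.drop (t + 1 - l)).take l == p.toList)) = true := by
        rw [List.any_eq_true]
        exact ⟨p, hmem, by rw [← hcond p]; exact hfp⟩
      rw [hT, hany]
      rw [hposs, List.set_append, if_neg (by omega), hPlen, Nat.sub_self,
        List.set_cons_zero, List.append_cons]

theorem portA_eq (ps : List String) (m : String) :
    get_valid ps m = reachTable ps m.toList m.toList.length := by
  have h := A_loop ps m.toList m.toList.length le_rfl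
  rw [Nat.sub_self, List.replicate_zero, List.append_nil] at h
  exact h

-- ends t s: walking the nonempty string s down the sibling chain t lands on an end node.
def ends : PTrie → List Char → Bool
  | PTrie.nil, _ => false
  | PTrie.node _ _ _ _, [] => false
  | PTrie.node ch e sub sib, c :: s =>
    if c = ch then
      match s with
      | [] => e
      | _ :: _ => ends sub s
    else ends sib (c :: s)
termination_by t s => (sizeOf t, s.length)

theorem ends_insert (t : PTrie) (c : Char) (rest s : List Char) :
    ends (insertT t c rest) s = (decide (s = c :: rest) || ends t s) := by
  induction t, c, rest using insertT.induct generalizing s with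
  | case1 c =>
    cases s with
    | nil => simp [insertT, ends]
    | cons c' s' =>
      by_cases hc : c' = c
      · subst hc
        cases s' <;> simp [insertT, ends]
      · cases s' <;> simp [insertT, ends, hc]
  | case2 c r rs ih =>
    cases s with
    | nil => simp [insertT, ends]
    | cons c' s' =>
      by_cases hc : c' = c
      · subst hc
        cases s' with
        | nil => simp [insertT, ends]
        | cons a b => simp [insertT, ends, ih]
      · cases s' <;> simp [insertT, ends, hc]
  | case3 e sub sib c =>
    cases s with
    | nil => simp [insertT, ends]
    | cons c' s' =>
      by_cases hc : c' = c
      · subst hc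
        cases s' <;> simp [insertT, ends]
      · cases s' <;> simp [insertT, ends, hc]
  | case4 e sub sib c r rs ih =>
    cases s with
    | nil => simp [insertT, ends]
    | cons c' s' =>
      by_cases hc : c' = c
      · subst hc
        cases s' with
        | nil => simp [insertT, ends]
        | cons a b => simp [insertT, ends, ih]
      · cases s' <;> simp [insertT, ends, hc]
  | case5 ch e sub sib c rest hch ih =>
    rw [insertT.eq_def]
    simp only [if_neg hch]
    cases s with
    | nil => simp [ends]
    | cons c' s' =>
      by_cases hc : c' = ch
      · subst hc
        cases s' <;> simp [ends, hch]
      · cases s' <;> simp [ends, hc, ih]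

-- root membership: ends of the folded trie = some prefix equals s (s nonempty is implied).
theorem ends_foldl (ps : List String) (t : PTrie) (s : List Char) :
    ends (ps.foldl (fun r p =>
      match p.toList with
      | [] => r
      | c :: rest => insertT r c rest) t) s
    = (ps.any (fun p => p.toList == s && !p.toList.isEmpty) || ends t s) := by
  induction ps generalizing t with
  | nil => simp
  | cons p ps ih =>
    rw [List.foldl_cons, List.any_cons, ih]
    cases hp : p.toList with
    | nil => simp [hp]
    | cons c rest =>
      have hred : (match c :: rest with
          | [] => t
          | c :: rest => insertT t c rest) = insertT t c rest := rfl
      rw [hred, ends_insert]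
      have hbe : (c :: rest == s && !(c :: rest).isEmpty) = decide (s = c :: rest) := by
        simp only [List.isEmpty_cons, Bool.not_false, Bool.and_true]
        rw [Bool.eq_iff_iff, beq_iff_eq, decide_eq_true_iff]
        exact eq_comm
      rw [hbe]
      cases h1 : ps.any (fun p => p.toList == s && !p.toList.isEmpty) <;>
        cases h2 : decide (s = c :: rest) <;> simp [h1, h2]

theorem take_drop_cons (cs : List Char) {j : Nat} (k : Nat) (h : j < cs.length) :
    (cs.drop j).take (k + 1) = cs.getD j default :: (cs.drop (j + 1)).take k := by
  rw [List.drop_eq_getElem_cons h, List.take_succ_cons, List.getD_eq_getElem _ _ h]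

theorem getD_set_ne (poss : List Bool) {k m : Nat} (v : Bool) (h : k ≠ m) :
    (poss.set k v).getD m false = poss.getD m false := by
  show (poss.set k v)[m]?.getD false = poss[m]?.getD false
  rw [List.getElem?_set_ne h]

theorem ends_cons_ne (ch : Char) (e : Bool) (sub sib : PTrie) (c : Char) (s : List Char)
    (hne : ¬ c = ch) : ends (PTrie.node ch e sub sib) (c :: s) = ends sib (c :: s) := by
  cases s <;> simp [ends, hne]

theorem ends_cons2 (ch : Char) (e : Bool) (sub sib : PTrie) (c a : Char) (b : List Char) :
    ends (PTrie.node ch e sub sib) (c :: a :: b)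
      = if c = ch then ends sub (a :: b) else ends sib (c :: a :: b) := by
  by_cases hc : c = ch <;> simp [ends, hc]

-- walkMark characterized pointwise.
theorem walk_getD (cs : List Char) (t : PTrie) (j : Nat) (poss : List Bool) :
    poss.length = cs.length + 1 →
    ∀ m, (walkMark cs t j poss).getD m false
      = (poss.getD m false
          || (decide (j < m ∧ m ≤ cs.length) && ends t ((cs.drop j).take (m - j)))) := by
  induction t, j, poss using walkMark.induct (cs := cs) with
  | case1 j poss =>
    intro hlen m
    simp [walkMark, ends]
  | case2 e sub sib j poss h ih =>
    intro hlen m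
    simp only [dite_eq_ite] at ih
    have hstep : walkMark cs (PTrie.node (cs.getD j default) e sub sib) j poss
        = walkMark cs sub (j + 1) (if e then poss.set (j + 1) true else poss) := by
      rw [walkMark]
      simp only [dif_pos h, eq_self_iff_true, if_true]
    rw [hstep]
    have hlen' : (if e then poss.set (j + 1) true else poss).length = cs.length + 1 := by
      cases e <;> simp [hlen]
    rw [ih hlen' m]
    by_cases hm : j < m ∧ m ≤ cs.length
    · obtain ⟨hm1, hm2⟩ := hm
      have hk : m - j = (m - j - 1) + 1 := by omega
      rw [hk, take_drop_cons cs _ h]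
      by_cases hmj : m = j + 1
      · subst hmj
        have htk : j + 1 - j - 1 = 0 := by omega
        rw [htk]
        simp only [List.take_zero, ends, if_pos rfl]
        have hlt : j + 1 < poss.length := by omega
        have hnot : ¬ (j + 1 < j + 1 ∧ j + 1 ≤ cs.length) := by omega
        cases e with
        | false =>
          simp [hnot, hm1, hm2]
        | true =>
          have hset : (poss.set (j + 1) true)[j + 1]?.getD false = true := by
            rw [List.getElem?_set_self hlt]
            rfl
          simp [List.getD, hset, hm1, hm2]
      · have hm1' : j + 1 < m := by omega
        have hP : (if e then poss.set (j + 1) true else poss).getD m false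
            = poss.getD m false := by
          cases e with
          | false => rfl
          | true => exact getD_set_ne poss true (by omega)
        rw [hP]
        -- the remaining slice is nonempty, so ends descends into sub
        obtain ⟨a, b, hab⟩ : ∃ a b, (cs.drop (j + 1)).take (m - j - 1) = a :: b := by
          cases htk : (cs.drop (j + 1)).take (m - j - 1) with
          | nil =>
            exfalso
            have := congrArg List.length htk
            simp only [List.length_take, List.length_drop, List.length_nil] at this
            omega
          | cons a b => exact ⟨a, b, rfl⟩
        have hk1 : m - j - 1 = (m - (j + 1) - 1) + 1 := by omega
        have hk2 : m - (j + 1) = m - j - 1 := by omega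
        rw [hab, ends_cons2, if_pos rfl, hk2, hab]
        simp [hm1, hm2, hm1']
    · have hnot2 : ¬ (j + 1 < m ∧ m ≤ cs.length) := by omega
      have hP : (if e then poss.set (j + 1) true else poss).getD m false
          = poss.getD m false := by
        cases e with
        | false => rfl
        | true => exact getD_set_ne poss true (by omega)
      simp only [hm, hnot2, decide_false, Bool.false_and, Bool.or_false, decide_eq_true_eq]
      exact hP
  | case3 ch e sub sib j poss h hne ih =>
    intro hlen m
    have hstep : walkMark cs (PTrie.node ch e sub sib) j poss = walkMark cs sib j poss := by
      rw [walkMark]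
      simp only [dif_pos h]
      rw [if_neg hne]
    rw [hstep, ih hlen m]
    by_cases hm : j < m ∧ m ≤ cs.length
    · obtain ⟨hm1, hm2⟩ := hm
      have hk : m - j = (m - j - 1) + 1 := by omega
      rw [hk, take_drop_cons cs _ h, ends_cons_ne _ _ _ _ _ _ hne, ← take_drop_cons cs _ h, ← hk]
    · simp [hm]
  | case4 ch e sub sib j poss h =>
    intro hlen m
    have hstep : walkMark cs (PTrie.node ch e sub sib) j poss = poss := by
      rw [walkMark]
      simp only [dif_neg h]
    have hnot : ¬ (j < m ∧ m ≤ cs.length) := by omega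
    simp [hstep, hnot]

theorem walk_length (cs : List Char) (t : PTrie) (j : Nat) (poss : List Bool) :
    (walkMark cs t j poss).length = poss.length := by
  induction t, j, poss using walkMark.induct (cs := cs) with
  | case1 j poss => simp [walkMark]
  | case2 e sub sib j poss h ih =>
    simp only [dite_eq_ite] at ih
    have hstep : walkMark cs (PTrie.node (cs.getD j default) e sub sib) j poss
        = walkMark cs sub (j + 1) (if e then poss.set (j + 1) true else poss) := by
      rw [walkMark]
      simp only [dif_pos h, eq_self_iff_true, if_true]
    rw [hstep, ih]
    cases e <;> simp
  | case3 ch e sub sib j poss h hne ih =>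
    have hstep : walkMark cs (PTrie.node ch e sub sib) j poss = walkMark cs sib j poss := by
      rw [walkMark]
      simp only [dif_pos h]
      rw [if_neg hne]
    rw [hstep, ih]
  | case4 ch e sub sib j poss h =>
    rw [walkMark]
    simp only [dif_neg h]

-- markB ps cs t j:-- markB ps cs t j: j is marked after B has processed positions 0, …, t-1.
def markB (ps : List String) (cs : List Char) (t j : Nat) : Bool :=
  decide (j = 0) || ps.any (fun p =>
    let l := p.toList.length
    decide (l ≤ j) && decide (j - l < t) && reach ps cs (j - l)
      && ((cs.drop (j - l)).take l == p.toList))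

theorem markB_self (ps : List String) (cs : List Char) (t : Nat) :
    markB ps cs t t = reach ps cs t := by
  cases t with
  | zero => rfl
  | succ k =>
    rw [reach_succ, markB]
    rw [show decide (k + 1 = 0) = false by simp, Bool.false_or]
    congr 1
    funext p
    simp only [String.length_toList]
    by_cases h1 : 1 ≤ p.length
    · by_cases h2 : p.length ≤ k + 1
      · have e1 : k + 1 - p.length < k + 1 := by omega
        simp [h1, h2, e1]
      · simp [h2]
    · have h0 : p.length = 0 := by omega
      have e1 : ¬ (k + 1 - p.length < k + 1) := by omega
      simp [h1, e1]

theorem markB_iff (ps : List String) (cs : List Char) (t j : Nat) :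
    markB ps cs t j = true
      ↔ (j = 0 ∨ ∃ p ∈ ps, p.toList.length ≤ j ∧ j - p.toList.length < t
          ∧ reach ps cs (j - p.toList.length) = true
          ∧ (cs.drop (j - p.toList.length)).take p.toList.length = p.toList) := by
  simp [markB, and_assoc]

theorem reach_iff (ps : List String) (cs : List Char) (k : Nat) :
    reach ps cs (k + 1) = true
      ↔ ∃ p ∈ ps, 1 ≤ p.toList.length ∧ p.toList.length ≤ k + 1
          ∧ reach ps cs (k + 1 - p.toList.length) = true
          ∧ (cs.drop (k + 1 - p.toList.length)).take p.toList.length = p.toList := by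
  rw [reach_succ]
  simp [and_assoc]

theorem markB_final (ps : List String) (cs : List Char) {j : Nat} (hj : j ≤ cs.length) :
    markB ps cs cs.length j = reach ps cs j := by
  rw [Bool.eq_iff_iff, markB_iff]
  constructor
  · rintro (h0 | ⟨p, hp, hle, hlt, hr, hsl⟩)
    · subst h0; rfl
    · by_cases hl : 1 ≤ p.toList.length
      · obtain ⟨k, rfl⟩ : ∃ k, j = k + 1 := ⟨j - 1, by omega⟩
        rw [reach_iff]
        exact ⟨p, hp, hl, hle, hr, hsl⟩
      · have h0 : p.toList.length = 0 := by omega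
        rw [h0, Nat.sub_zero] at hr
        exact hr
  · intro h
    cases j with
    | zero => exact Or.inl rfl
    | succ k =>
      rw [reach_iff] at h
      obtain ⟨p, hp, h1, h2, hr, hsl⟩ := h
      exact Or.inr ⟨p, hp, h2, by omega, hr, hsl⟩

theorem markB_stable (ps : List String) (cs : List Char) {t : Nat} (j : Nat)
    (hreach : reach ps cs t = false) :
    markB ps cs (t + 1) j = markB ps cs t j := by
  unfold markB
  congr 1
  congr 1
  funext p
  dsimp only
  by_cases he : j - p.toList.length = t
  · rw [he, hreach]
    simp
  · rw [show decide (j - p.toList.length < t + 1) = decide (j - p.toList.length < t) by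
      rw [decide_eq_decide]; omega]

theorem markB_step (ps : List String) (cs : List Char) {t j : Nat}
    (hreach : reach ps cs t = true) (hj : j ≤ cs.length) :
    markB ps cs (t + 1) j
      = (markB ps cs t j
          || (decide (t < j ∧ j ≤ cs.length)
              && ps.any (fun p => p.toList == (cs.drop t).take (j - t) && !p.toList.isEmpty))) := by
  rw [Bool.eq_iff_iff]
  simp only [Bool.or_eq_true, Bool.and_eq_true, decide_eq_true_iff, List.any_eq_true,
    Bool.not_eq_eq_eq_not, Bool.not_true, beq_iff_eq]
  rw [markB_iff, markB_iff]
  constructor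
  · rintro (h0 | ⟨p, hp, hle, hlt, hr, hsl⟩)
    · exact Or.inl (Or.inl h0)
    · rcases Nat.lt_or_ge (j - p.toList.length) t with hlt' | hge
      · exact Or.inl (Or.inr ⟨p, hp, hle, hlt', hr, hsl⟩)
      · have heq : j - p.toList.length = t := by omega
        by_cases hl : 1 ≤ p.toList.length
        · refine Or.inr ⟨⟨by omega, hj⟩, p, hp, ?_, ?_⟩
          · rw [show j - t = p.toList.length from by omega, ← heq]
            exact hsl.symm
          · cases hpt : p.toList with
            | nil => rw [hpt] at hl; simp at hl
            | cons a b => simp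
        · have h0 : p.toList.length = 0 := by omega
          have hjt : j = t := by omega
          refine Or.inl ?_
          rw [hjt, ← markB_iff, markB_self]
          exact hreach
  · rintro (h | ⟨⟨hjt, hjn⟩, p, hp, hsl, hne⟩)
    · rcases h with h0 | ⟨p, hp, hle, hlt, hr, hsl⟩
      · exact Or.inl h0
      · exact Or.inr ⟨p, hp, hle, by omega, hr, hsl⟩
    · have hlp : p.toList.length = j - t := by
        rw [hsl]
        simp only [List.length_take, List.length_drop]
        omega
      refine Or.inr ⟨p, hp, by omega, by omega, ?_, ?_⟩
      · rw [show j - p.toList.length = t from by omega]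
        exact hreach
      · rw [show j - p.toList.length = t from by omega, hlp]
        exact hsl.symm

def stepB (ps : List String) (cs : List Char) (poss : List Bool) (i : Nat) : List Bool :=
  if poss.getD i false then
    walkMark cs (ps.foldl (fun r p =>
      match p.toList with
      | [] => r
      | c :: rest => insertT r c rest) PTrie.nil) i poss
  else poss

theorem B_loop (ps : List String) (cs : List Char) (t : Nat) (ht : t ≤ cs.length) :
    ((List.range t).foldl (stepB ps cs) ((List.replicate (cs.length + 1) false).set 0 true)).length
        = cs.length + 1
    ∧ ∀ j ≤ cs.length,
        ((List.range t).foldl (stepB ps cs) ((List.replicate (cs.length + 1) false).set 0 true)).getD j false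
          = markB ps cs t j := by
  induction t with
  | zero =>
    refine ⟨by simp, ?_⟩
    intro j hj
    rw [List.range_zero, List.foldl_nil, List.replicate_succ, List.set_cons_zero]
    cases j with
    | zero => simp [markB]
    | succ k =>
      have hL : (true :: List.replicate cs.length false).getD (k + 1) false = false := by
        rw [List.getD_cons_succ]
        show (List.replicate cs.length false)[k]?.getD false = false
        rw [List.getElem?_replicate]
        split <;> rfl
      rw [hL]
      simp [markB]
  | succ t iht =>
    obtain ⟨ihlen, ihgd⟩ := iht (by omega)
    rw [List.range_succ, List.foldl_append, List.foldl_cons, List.foldl_nil]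
    set Bt := (List.range t).foldl (stepB ps cs) ((List.replicate (cs.length + 1) false).set 0 true) with hBt
    have hgate : Bt.getD t false = reach ps cs t := by
      rw [hBt, ihgd t (by omega), markB_self]
    unfold stepB
    rw [hgate]
    cases hreach : reach ps cs t with
    | false =>
      rw [if_neg (by simp)]
      refine ⟨ihlen, ?_⟩
      intro j hj
      rw [markB_stable ps cs j hreach]
      exact ihgd j hj
    | true =>
      rw [if_pos rfl]
      refine ⟨by rw [walk_length, ihlen], ?_⟩
      intro j hj
      rw [walk_getD cs _ t Bt ihlen j, ihgd j hj, markB_step ps cs hreach hj, ends_foldl]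
      have hnil : ends PTrie.nil ((cs.drop t).take (j - t)) = false := by
        simp [ends]
      rw [hnil, Bool.or_false]

theorem portB_eq (ps : List String) (m : String) :
    get_valid_alt ps m = reachTable ps m.toList m.toList.length := by
  obtain ⟨hlen, hgd⟩ := B_loop ps m.toList m.toList.length le_rfl
  have e : get_valid_alt ps m
      = (List.range m.toList.length).foldl (stepB ps m.toList)
          ((List.replicate (m.toList.length + 1) false).set 0 true) := rfl
  rw [e]
  apply List.ext_getElem (by rw [hlen, length_reachTable])
  intro i h1 h2
  rw [← List.getD_eq_getElem _ false h1, ← List.getD_eq_getElem _ false h2]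
  rw [hlen] at h1
  rw [hgd i (by omega), markB_final ps m.toList (by omega),
    getD_reachTable ps m.toList (by omega)]

-- ===== VERDICT (by name: the statement is the Claim_ definition above) =====
theorem get_valid_spec : Claim_equal_get_valid := by
  intro ps m _
  unfold Spec_get_valid
  rw [portA_eq, portB_eq]
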